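-- pv_equiv track=rewrite | github.com/Alpha-Mintamir/leetcode | 2421-maximum-number-of-pairs-in-array/maximum-number-of-pairs-in-array.py | numberOfPairs
-- ===== SOURCE A (Python) =====
-- def numberOfPairs(nums):
--     pairs = 0
--     leftovers = 0
--     dictt = {}
--     for i in nums:
--         dictt[i] = dictt.get(i, 0)+1
--
--     for i in dictt.values():
--         if i%2 != 0:
--             leftovers += 1
--             pairs += i//2
--
--         else:
--             pairs += i//2
--     return [pairs, leftovers]
-- ===== SOURCE B (Python) =====
-- def numberOfPairs(nums):
--     pairs = 0
--     unpaired = set()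
--     for x in nums:
--         if x in unpaired:
--             unpaired.remove(x)
--             pairs += 1
--         else:
--             unpaired.add(x)
--     return [pairs, len(unpaired)]
-- ===== Notes on version B (the rewrite author's own statement) =====
-- stated objective: alternative
-- what changed: Replaced the two-phase frequency-dict build + reduction over its values by a single pass that toggles each element in a set of currently-unpaired values, counting a pair on each second sighting; leftovers is the final set size.
import Mathlib
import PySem

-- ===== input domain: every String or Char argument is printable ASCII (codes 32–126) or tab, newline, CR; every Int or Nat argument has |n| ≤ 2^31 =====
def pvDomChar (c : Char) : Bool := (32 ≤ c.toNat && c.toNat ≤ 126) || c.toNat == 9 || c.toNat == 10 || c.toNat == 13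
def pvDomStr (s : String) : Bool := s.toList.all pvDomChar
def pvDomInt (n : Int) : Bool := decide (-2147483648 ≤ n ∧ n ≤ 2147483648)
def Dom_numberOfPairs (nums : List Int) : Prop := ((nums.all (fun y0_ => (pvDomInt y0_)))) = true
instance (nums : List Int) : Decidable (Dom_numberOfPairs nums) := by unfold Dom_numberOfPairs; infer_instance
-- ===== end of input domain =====

-- B replaces A's frequency-dict build + reduction over its values by one pass toggling a set of
-- currently-unpaired values (objective: alternative decomposition, same O(n) cost).

-- ===== PORT A =====
def numberOfPairs (nums : List Int) : List Int :=
  -- dictt[i] = dictt.get(i, 0) + 1 over nums, then the reduction over dictt.values()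
  let dictt := nums.foldl (fun d i => d.insert i (d.getD i 0 + 1)) (PySem.Dict.empty : PySem.Dict Int Int)
  let pl := dictt.values.foldl
    (fun (pl : Int × Int) i =>
      if PySem.Int.mod i 2 ≠ 0 then (pl.1 + PySem.Int.floordiv i 2, pl.2 + 1)
      else (pl.1 + PySem.Int.floordiv i 2, pl.2)) (0, 0)
  [pl.1, pl.2]

-- ===== PORT B =====
-- 'unpaired.remove(x)' runs only after the membership test succeeded, so it is Set.discard here (no KeyError path).
def numberOfPairs_alt (nums : List Int) : List Int :=
  let st := nums.foldl
    (fun (st : Int × PySem.Set Int) x =>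
      if PySem.Set.contains st.2 x then (st.1 + 1, PySem.Set.discard st.2 x)
      else (st.1, PySem.Set.add st.2 x)) (0, (PySem.Set.empty : PySem.Set Int))
  [st.1, PySem.Set.len st.2]

-- ===== PRECONDITION & SPEC =====
def Spec_numberOfPairs (nums : List Int) (out : List Int) : Prop := out = numberOfPairs_alt nums
instance (nums : List Int) (out : List Int) : Decidable (Spec_numberOfPairs nums out) := by unfold Spec_numberOfPairs; infer_instance

-- ===== CLAIM (what is proved, stated in full; the proofs are below) =====
def Claim_equal_numberOfPairs : Prop := ∀ (nums : List Int), Dom_numberOfPairs nums → Spec_numberOfPairs nums (numberOfPairs nums)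

-- ===== LEMMAS AND PROOFS =====

-- a map whose function changes only at one element of a Nodup list shifts the sum by the change there
lemma pvSumUpdate (l : List Int) (hnd : l.Nodup) (x : Int) (hx : x ∈ l)
    (f g : Int → Int) (d : Int) (hgx : g x = f x + d) (hgy : ∀ y ∈ l, y ≠ x → g y = f y) :
    (l.map g).sum = (l.map f).sum + d := by
  induction l with
  | nil => simp at hx
  | cons z zs ih =>
    rcases List.mem_cons.mp hx with rfl | hmem
    · have hzs : zs.map g = zs.map f := List.map_congr_left (fun y hy => by
        have hz := (List.nodup_cons.mp hnd).1
        exact hgy y (List.mem_cons_of_mem _ hy) (fun h => hz (h ▸ hy)))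
      simp [hzs, hgx]; ring
    · have hz : z ≠ x := fun h => (List.nodup_cons.mp hnd).1 (h ▸ hmem)
      have := ih (List.nodup_cons.mp hnd).2 hmem (fun y hy hne => hgy y (List.mem_cons_of_mem _ hy) hne)
      simp [this, hgy z List.mem_cons_self hz]; ring

-- B's loop body, named for the induction
def pvStep (st : Int × PySem.Set Int) (x : Int) : Int × PySem.Set Int :=
  if PySem.Set.contains st.2 x then (st.1 + 1, PySem.Set.discard st.2 x)
  else (st.1, PySem.Set.add st.2 x)

-- invariant of B's loop: the set holds exactly the odd-count values seen so far,
-- and the pair counter is the sum of count/2 over the distinct values seen so far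
lemma pvBInv (t : List Int) :
    (t.foldl pvStep (0, PySem.Set.empty)).2.Nodup ∧
    (∀ y, y ∈ (t.foldl pvStep (0, PySem.Set.empty)).2 ↔ t.count y % 2 = 1) ∧
    (t.foldl pvStep (0, PySem.Set.empty)).1
      = ((PySem.Set.ofList t).map (fun k => ((t.count k / 2 : Nat) : Int))).sum := by
  induction t using List.reverseRecOn with
  | nil => simp [PySem.Set.empty, PySem.Set.ofList]
  | append_singleton t x ih =>
    obtain ⟨hnd, hmem, hsum⟩ := ih
    set st := t.foldl pvStep (0, (PySem.Set.empty : PySem.Set Int)) with hst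
    have hfold : (t ++ [x]).foldl pvStep (0, (PySem.Set.empty : PySem.Set Int)) = pvStep st x := by
      rw [List.foldl_append, List.foldl_cons, List.foldl_nil]
    have hcnt : ∀ y : Int, (t ++ [x]).count y = t.count y + (if y = x then 1 else 0) := by
      intro y
      rw [List.count_append]
      congr 1
      by_cases h : y = x
      · subst h; simp
      · simp [List.count_eq_zero, h]
    by_cases hin : x ∈ st.2
    · have hodd : t.count x % 2 = 1 := (hmem x).mp hin
      have hxin : x ∈ t := by
        by_contra h
        simp [List.count_eq_zero_of_not_mem h] at hodd
      have hstep : pvStep st x = (st.1 + 1, PySem.Set.discard st.2 x) := by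
        simp [pvStep, hin]
      rw [hfold, hstep]
      refine ⟨PySem.Set.nodup_discard st.2 x hnd, ?_, ?_⟩
      · intro y
        rw [PySem.Set.mem_discard st.2 x y]
        by_cases hyx : y = x
        · subst hyx; simp [hcnt]; omega
        · simp [hmem y, hcnt, hyx]
      · have hset : PySem.Set.ofList (t ++ [x]) = PySem.Set.ofList t := by
          rw [PySem.Set.ofList_append_singleton,
            PySem.Set.add_of_mem ((PySem.Set.mem_ofList t x).mpr hxin)]
        rw [hset]
        have := pvSumUpdate (PySem.Set.ofList t) (PySem.Set.nodup_ofList t) x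
          ((PySem.Set.mem_ofList t x).mpr hxin)
          (fun k => ((t.count k / 2 : Nat) : Int))
          (fun k => (((t ++ [x]).count k / 2 : Nat) : Int)) 1
          (by simp [hcnt]; omega)
          (fun y _ hyx => by simp [hcnt, hyx])
        simp only [this, hsum]
    · have hstep : pvStep st x = (st.1, PySem.Set.add st.2 x) := by
        simp [pvStep, hin]
      rw [hfold, hstep]
      refine ⟨PySem.Set.nodup_add st.2 x hnd, ?_, ?_⟩
      · intro y
        rw [PySem.Set.mem_add st.2 x y]
        by_cases hyx : y = x
        · subst hyx
          have hnotodd : ¬ (t.count y % 2 = 1) := fun h => hin ((hmem y).mpr h)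
          simp [hcnt]; omega
        · simp [hmem y, hcnt, hyx]
      · by_cases hxin : x ∈ t
        · have hnotodd : ¬ (t.count x % 2 = 1) := fun h => hin ((hmem x).mpr h)
          have hset : PySem.Set.ofList (t ++ [x]) = PySem.Set.ofList t := by
            rw [PySem.Set.ofList_append_singleton,
              PySem.Set.add_of_mem ((PySem.Set.mem_ofList t x).mpr hxin)]
          rw [hset]
          have := pvSumUpdate (PySem.Set.ofList t) (PySem.Set.nodup_ofList t) x
            ((PySem.Set.mem_ofList t x).mpr hxin)
            (fun k => ((t.count k / 2 : Nat) : Int))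
            (fun k => (((t ++ [x]).count k / 2 : Nat) : Int)) 0
            (by simp [hcnt]; omega)
            (fun y _ hyx => by simp [hcnt, hyx])
          simp only [this, hsum, add_zero]
        · have hset : PySem.Set.ofList (t ++ [x]) = PySem.Set.ofList t ++ [x] := by
            rw [PySem.Set.ofList_append_singleton,
              PySem.Set.add_of_not_mem (fun h => hxin ((PySem.Set.mem_ofList t x).mp h))]
          rw [hset, List.map_append, List.sum_append]
          have hmap : (PySem.Set.ofList t).map (fun k => (((t ++ [x]).count k / 2 : Nat) : Int))
              = (PySem.Set.ofList t).map (fun k => ((t.count k / 2 : Nat) : Int)) :=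
            List.map_congr_left (fun y hy => by
              have : y ≠ x := fun h => hxin (h ▸ (PySem.Set.mem_ofList t y).mp hy)
              simp [hcnt, this])
          rw [hmap, hsum]
          simp [hcnt, List.count_eq_zero_of_not_mem hxin]

-- A's reduction loop over any value list, as a sum plus a count
lemma pvPairFold (l : List Int) (a b : Int) :
    l.foldl (fun (pl : Int × Int) i =>
      if PySem.Int.mod i 2 ≠ 0 then (pl.1 + PySem.Int.floordiv i 2, pl.2 + 1)
      else (pl.1 + PySem.Int.floordiv i 2, pl.2)) (a, b)
    = (a + (l.map (fun i => PySem.Int.floordiv i 2)).sum,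
       b + (l.countP (fun i => decide (PySem.Int.mod i 2 ≠ 0)) : Int)) := by
  induction l generalizing a b with
  | nil => simp
  | cons x xs ih =>
    rw [List.foldl_cons]
    have hm : PySem.Int.mod x 2 = x % 2 := PySem.Int.mod_eq_emod_of_pos (by omega)
    by_cases hx : PySem.Int.mod x 2 ≠ 0
    · have hx' : x % 2 = 1 := by rw [hm] at hx; omega
      rw [if_pos hx, ih]
      simp only [List.map_cons, List.sum_cons, List.countP_cons]
      refine Prod.ext ?_ ?_ <;> simp [hx'] <;> ring
    · have hx' : ¬ (x % 2 = 1) := by rw [hm] at hx; omega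
      rw [if_neg hx, ih]
      simp only [List.map_cons, List.sum_cons, List.countP_cons]
      refine Prod.ext ?_ ?_ <;> simp [hx'] <;> ring

-- ===== VERDICT (by name: the statement is the Claim_ definition above) =====
theorem numberOfPairs_spec : Claim_equal_numberOfPairs := by
  intro nums _
  unfold Spec_numberOfPairs numberOfPairs numberOfPairs_alt
  show _ = (let st := nums.foldl pvStep (0, (PySem.Set.empty : PySem.Set Int)); [st.1, PySem.Set.len st.2])
  obtain ⟨hnd, hmem, hsum⟩ := pvBInv nums
  set st := nums.foldl pvStep (0, (PySem.Set.empty : PySem.Set Int)) with hst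
  simp only [PySem.Dict.foldl_insert_getD_add_one_eq_counter]
  have hvals : (PySem.Dict.counter nums).values
      = (PySem.Set.ofList nums).map (fun k => ((nums.count k : Nat) : Int)) := by
    show (PySem.Dict.counter nums).items.map (·.2) = _
    rw [PySem.Dict.items_counter, List.map_map]
    rfl
  rw [hvals, pvPairFold]
  -- first component: each dict value v contributes v//2, i.e. count/2
  have h1 : ((PySem.Set.ofList nums).map (fun k => ((nums.count k : Nat) : Int))).map
      (fun i => PySem.Int.floordiv i 2)
      = (PySem.Set.ofList nums).map (fun k => ((nums.count k / 2 : Nat) : Int)) := by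
    rw [List.map_map]
    refine List.map_congr_left (fun y _ => ?_)
    show PySem.Int.floordiv ((nums.count y : Nat) : Int) ((2:Nat) : Int) = _
    rw [PySem.Int.floordiv_natCast]
  -- second component: the odd-value count over the dict equals the final set's size
  have h2 : (((PySem.Set.ofList nums).map (fun k => ((nums.count k : Nat) : Int))).countP
        (fun i => decide (PySem.Int.mod i 2 ≠ 0)) : Nat)
      = st.2.length := by
    rw [List.countP_map]
    have hp : ((fun i => decide (PySem.Int.mod i 2 ≠ 0)) ∘ (fun k => ((nums.count k : Nat) : Int)))
        = (fun k => decide (nums.count k % 2 = 1)) := by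
      funext k
      show decide (PySem.Int.mod ((nums.count k : Nat) : Int) ((2:Nat) : Int) ≠ 0) = _
      rw [PySem.Int.mod_natCast]
      rcases Nat.mod_two_eq_zero_or_one (nums.count k) with h | h <;> simp [h]
    rw [hp, List.countP_eq_length_filter]
    have hperm : (List.filter (fun k => decide (nums.count k % 2 = 1)) (PySem.Set.ofList nums)).Perm st.2 := by
      rw [List.perm_ext_iff_of_nodup ((PySem.Set.nodup_ofList nums).filter _) hnd]
      intro a
      rw [List.mem_filter, hmem a, PySem.Set.mem_ofList]
      constructor
      · rintro ⟨_, h⟩; simpa using h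
      · intro h
        refine ⟨?_, by simpa using h⟩
        by_contra hna
        simp [List.count_eq_zero_of_not_mem hna] at h
    exact hperm.length_eq
  have hlen : PySem.Set.len st.2 = (st.2.length : Int) := by simp [PySem.Set.len]
  rw [hsum, hlen, ← h2, h1]
  simp
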